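-- pv_equiv track=rewrite | github.com/HriscuOvidiu/Cripto-UAIC | Tema3/attack.py | compute_fraction_alfa
-- ===== SOURCE A (Python) =====
-- def compute_fraction_alfa(v, i):
--     if i < 0:
--         return 0
--     if i == 0:
--         return v[0]
--     if i == 1:
--         return v[0] * v[1] + 1
--     else:
--         return v[i] * compute_fraction_alfa(v, i - 1) + compute_fraction_alfa(v, i - 2)
-- ===== SOURCE B (Python) =====
-- def compute_fraction_alfa(v, i):
--     if i < 0:
--         return 0
--     prev, cur = 1, v[0]
--     for k in range(1, i + 1):
--         prev, cur = cur, v[k] * cur + prev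
--     return cur
-- ===== Notes on version B (the rewrite author's own statement) =====
-- stated objective: alternative
-- what changed: Replaces the double recursion with a single bottom-up loop keeping only the previous two continuant values.
-- outside the precondition, e.g. on compute_fraction_alfa([3], 1): A raises IndexError, B raises IndexError
import Mathlib
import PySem

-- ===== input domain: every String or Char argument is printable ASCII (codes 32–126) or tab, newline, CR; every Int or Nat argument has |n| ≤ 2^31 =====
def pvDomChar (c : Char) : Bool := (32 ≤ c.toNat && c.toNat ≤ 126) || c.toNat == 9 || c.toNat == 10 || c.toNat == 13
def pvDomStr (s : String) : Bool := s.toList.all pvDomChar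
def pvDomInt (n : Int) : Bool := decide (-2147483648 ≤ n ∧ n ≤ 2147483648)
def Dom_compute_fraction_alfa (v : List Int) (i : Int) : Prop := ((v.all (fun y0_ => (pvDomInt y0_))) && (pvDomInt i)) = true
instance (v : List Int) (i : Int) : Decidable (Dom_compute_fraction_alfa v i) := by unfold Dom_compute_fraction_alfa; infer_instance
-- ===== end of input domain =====

-- B: bottom-up loop keeping the previous two continuant values instead of A's double recursion.


-- ===== PORT A =====
-- naive double recursion of A, on the natural number i.toNat (A only recurses when i ≥ 0)
def fracA (v : List Int) : Nat → Int
  | 0 => (PySem.List.pyGet? v 0).getD 0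
  | 1 => (PySem.List.pyGet? v 0).getD 0 * (PySem.List.pyGet? v 1).getD 0 + 1
  | (n+2) => (PySem.List.pyGet? v ((n : Int)+2)).getD 0 * fracA v (n+1) + fracA v n

def compute_fraction_alfa (v : List Int) (i : Int) : Int :=
  if i < 0 then 0 else fracA v i.toNat

-- ===== PORT B =====
-- B: bottom-up loop over range(1, i+1) carrying (prev, cur)
def compute_fraction_alfa_alt (v : List Int) (i : Int) : Int :=
  if i < 0 then 0 else
    ((PySem.List.pyRange 1 (i+1) 1).foldl
      (fun (pc : Int × Int) k => (pc.2, (PySem.List.pyGet? v k).getD 0 * pc.2 + pc.1))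
      (1, (PySem.List.pyGet? v 0).getD 0)).2

-- ===== PRECONDITION & SPEC =====
-- Pre_: A raises IndexError when 0 ≤ i but i ≥ len(v) (it indexes v[i] down to v[0]).
def Pre_compute_fraction_alfa (v : List Int) (i : Int) : Prop := i < (v.length : Int)
instance (v : List Int) (i : Int) : Decidable (Pre_compute_fraction_alfa v i) := by unfold Pre_compute_fraction_alfa; infer_instance
def pvWitness_compute_fraction_alfa : List Int × Int := ([2, 3, 1], 2)

def Spec_compute_fraction_alfa (v : List Int) (i : Int) (out : Int) : Prop := out = compute_fraction_alfa_alt v i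
instance (v : List Int) (i : Int) (out : Int) : Decidable (Spec_compute_fraction_alfa v i out) := by unfold Spec_compute_fraction_alfa; infer_instance

-- ===== CLAIM (what is proved, stated in full; the proofs are below) =====
def Claim_equal_compute_fraction_alfa : Prop := ∀ (v : List Int) (i : Int), Dom_compute_fraction_alfa v i → Pre_compute_fraction_alfa v i → Spec_compute_fraction_alfa v i (compute_fraction_alfa v i)

-- ===== LEMMAS AND PROOFS =====

-- The loop state after processing 1..n is (previous continuant, fracA v n).
theorem fold_eq (v : List Int) (n : Nat) :
    (PySem.List.pyRange 1 ((n : Int)+1) 1).foldl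
      (fun (pc : Int × Int) k => (pc.2, (PySem.List.pyGet? v k).getD 0 * pc.2 + pc.1))
      (1, (PySem.List.pyGet? v 0).getD 0)
    = ((if n = 0 then 1 else fracA v (n-1)), fracA v n) := by
  induction n with
  | zero => simp [PySem.List.pyRange_one_eq_nil, fracA]
  | succ m ih =>
      push_cast
      rw [PySem.List.pyRange_one_succ_right (by omega), List.foldl_append]
      push_cast at ih
      rw [ih]
      cases m with
      | zero => simp [fracA]; ring
      | succ k =>
          simp only [List.foldl_cons, List.foldl_nil]
          have : ((k : Int) + 1 + 1) = ((k : Int) + 2) := by ring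
          simp [fracA, this]

-- ===== VERDICT (by name: the statement is the Claim_ definition above) =====
theorem compute_fraction_alfa_spec : Claim_equal_compute_fraction_alfa := by
  intro v i _ _
  unfold Spec_compute_fraction_alfa compute_fraction_alfa compute_fraction_alfa_alt
  split_ifs with h
  · rfl
  · have : i = ((i.toNat : Int)) := (Int.toNat_of_nonneg (by omega)).symm
    rw [this, fold_eq v i.toNat]
    simp
    congr 1
    omega
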